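-- pv_equiv track=rewrite | github.com/vferreira11/app-ef-log | scripts/core/utils.py | calculate_max_capacity
-- ===== SOURCE A (Python) =====
-- from typing import List, Tuple, Dict
--
-- def calculate_max_capacity(container_volume: int, block_dims: List[Tuple[int, int, int]]) -> int:
--     """
--     Calcula a capacidade máxima teórica do container.
--
--     Args:
--         container_volume: Volume total do container
--         block_dims: Lista de dimensões dos blocos
--
--     Returns:
--         Número máximo de blocos que cabem teoricamente
--     """
--     if not block_dims:
--         return 0
--
--     block_volumes = [lx * ly * lz for lx, ly, lz in block_dims]
--     total_block_volume = sum(block_volumes)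
--
--     # Capacidade baseada no volume
--     max_blocks = 0
--     used_volume = 0
--     for vol in block_volumes:
--         if used_volume + vol <= container_volume:
--             used_volume += vol
--             max_blocks += 1
--         else:
--             break
--
--     return min(max_blocks, len(block_dims))
-- ===== SOURCE B (Python) =====
-- from bisect import bisect_right
-- from itertools import accumulate
--
-- def calculate_max_capacity(container_volume, block_dims):
--     prefix_sums = accumulate(lx * ly * lz for lx, ly, lz in block_dims)
--     running_max = list(accumulate(prefix_sums, max))
--     return bisect_right(running_max, container_volume)
-- ===== Notes on version B (the rewrite author's own statement) =====
-- stated objective: alternative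
-- what changed: Replaces A's accumulate-and-break scan by a reduction to sorted search: build prefix sums, take their running maxima (a nondecreasing array), and locate the answer with bisect_right binary search instead of a stopping loop.
import Mathlib
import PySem

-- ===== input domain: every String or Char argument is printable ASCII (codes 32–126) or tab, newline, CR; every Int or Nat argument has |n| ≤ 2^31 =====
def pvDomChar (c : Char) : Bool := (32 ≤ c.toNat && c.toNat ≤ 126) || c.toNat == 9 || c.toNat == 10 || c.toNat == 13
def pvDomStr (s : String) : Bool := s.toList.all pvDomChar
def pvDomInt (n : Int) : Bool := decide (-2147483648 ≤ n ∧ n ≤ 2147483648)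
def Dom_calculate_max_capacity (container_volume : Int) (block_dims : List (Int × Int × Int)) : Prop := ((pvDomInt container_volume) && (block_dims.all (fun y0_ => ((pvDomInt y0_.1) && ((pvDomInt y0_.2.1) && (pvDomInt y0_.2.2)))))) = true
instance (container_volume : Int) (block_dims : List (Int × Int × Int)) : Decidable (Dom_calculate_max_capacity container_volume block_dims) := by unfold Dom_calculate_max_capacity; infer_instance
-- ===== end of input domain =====

-- B reduces the task to sorted search: prefix sums, their running maxima (nondecreasing),
-- then bisect_right finds the answer by binary search instead of a stopping scan (alternative, same cost).

-- ===== PORT A =====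
-- the 'for vol in block_volumes: … else: break' loop, state (used_volume, max_blocks)
def pvLoopA (cv : Int) : List Int → Int → Int → Int
  | [], _, mx => mx
  | v :: vs, used, mx =>
    if used + v ≤ cv then pvLoopA cv vs (used + v) (mx + 1) else mx

def calculate_max_capacity (container_volume : Int) (block_dims : List (Int × Int × Int)) : Int :=
  if block_dims = [] then 0
  else
    let block_volumes := block_dims.map (fun d => d.1 * d.2.1 * d.2.2)
    let max_blocks := pvLoopA container_volume block_volumes 0 0
    min max_blocks (block_dims.length : Int)

-- ===== PORT B =====
-- itertools.accumulate: running prefix sums (no initial element)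
def pvAccum (s : Int) : List Int → List Int
  | [] => []
  | v :: vs => (s + v) :: pvAccum (s + v) vs

-- itertools.accumulate(_, max): running maxima, seeded by the first element
def pvRunMaxGo (m : Int) : List Int → List Int
  | [] => []
  | v :: vs => (max m v) :: pvRunMaxGo (max m v) vs

def pvRunMax : List Int → List Int
  | [] => []
  | v :: vs => v :: pvRunMaxGo v vs

def calculate_max_capacity_alt (container_volume : Int) (block_dims : List (Int × Int × Int)) : Int :=
  let prefix_sums := pvAccum 0 (block_dims.map (fun d => d.1 * d.2.1 * d.2.2))
  let running_max := pvRunMax prefix_sums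
  ((PySem.List.bisectRight running_max container_volume : Nat) : Int)

-- ===== PRECONDITION & SPEC =====
def Spec_calculate_max_capacity (container_volume : Int) (block_dims : List (Int × Int × Int)) (out : Int) : Prop := out = calculate_max_capacity_alt container_volume block_dims
instance (container_volume : Int) (block_dims : List (Int × Int × Int)) (out : Int) : Decidable (Spec_calculate_max_capacity container_volume block_dims out) := by unfold Spec_calculate_max_capacity; infer_instance

-- ===== CLAIM (what is proved, stated in full; the proofs are below) =====
def Claim_equal_calculate_max_capacity : Prop := ∀ (container_volume : Int) (block_dims : List (Int × Int × Int)), Dom_calculate_max_capacity container_volume block_dims → Spec_calculate_max_capacity container_volume block_dims (calculate_max_capacity container_volume block_dims)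

-- ===== LEMMAS AND PROOFS =====
theorem pvAccum_length (s : Int) (vs : List Int) : (pvAccum s vs).length = vs.length := by
  induction vs generalizing s with
  | nil => rfl
  | cons v vs ih => simp [pvAccum, ih]

-- A's loop counts the leading run of prefix sums that stay within cv
theorem pvLoopA_eq_takeWhile (cv : Int) (vs : List Int) (used mx : Int) :
    pvLoopA cv vs used mx
      = mx + (((pvAccum used vs).takeWhile (fun s => decide (s ≤ cv))).length : Int) := by
  induction vs generalizing used mx with
  | nil => simp [pvLoopA, pvAccum]
  | cons v vs ih =>
    by_cases h : used + v ≤ cv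
    · simp [pvLoopA, pvAccum, h, ih]
      ring
    · simp [pvLoopA, pvAccum, h]

-- the running maxima form a ≤-chain from their seed
theorem pvRunMaxGo_chain (m : Int) (vs : List Int) :
    List.IsChain (· ≤ ·) (m :: pvRunMaxGo m vs) := by
  induction vs generalizing m with
  | nil => simp [pvRunMaxGo]
  | cons v vs ih => exact List.IsChain.cons_cons (le_max_left m v) (ih (max m v))

theorem pvRunMax_pairwise (vs : List Int) :
    List.Pairwise (· ≤ ·) (pvRunMax vs) := by
  cases vs with
  | nil => exact List.Pairwise.nil
  | cons v vs => exact (pvRunMaxGo_chain v vs).pairwise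

-- takeWhile stops exactly where the running max first leaves the limit
theorem takeWhile_runMaxGo (cv m : Int) (vs : List Int) (hm : m ≤ cv) :
    ((pvRunMaxGo m vs).takeWhile (fun s => decide (s ≤ cv))).length
      = (vs.takeWhile (fun s => decide (s ≤ cv))).length := by
  induction vs generalizing m with
  | nil => rfl
  | cons v vs ih =>
    by_cases hv : v ≤ cv
    · have hmv : max m v ≤ cv := max_le hm hv
      simp [pvRunMaxGo, List.takeWhile, hv, hmv, ih _ hmv]
    · have hmv : ¬ max m v ≤ cv := fun h => hv (le_trans (le_max_right m v) h)
      simp [pvRunMaxGo, List.takeWhile, hv, hmv]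

theorem takeWhile_runMax (cv : Int) (vs : List Int) :
    ((pvRunMax vs).takeWhile (fun s => decide (s ≤ cv))).length
      = (vs.takeWhile (fun s => decide (s ≤ cv))).length := by
  cases vs with
  | nil => rfl
  | cons v vs =>
    by_cases hv : v ≤ cv
    · simp [pvRunMax, List.takeWhile, hv, takeWhile_runMaxGo cv v vs hv]
    · simp [pvRunMax, List.takeWhile, hv]

-- a cut point (all ≤ x before it, all > x from it on) is the takeWhile length
theorem takeWhile_length_of_cut (x : Int) (a : List Int) (r : Nat) (hr : r ≤ a.length)
    (h1 : ∀ (j : Nat) (hj : j < a.length), j < r → a[j] ≤ x)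
    (h2 : ∀ (j : Nat) (hj : j < a.length), r ≤ j → x < a[j]) :
    (a.takeWhile (fun s => decide (s ≤ x))).length = r := by
  induction a generalizing r with
  | nil =>
    simp only [List.length_nil, Nat.le_zero] at hr
    subst hr; rfl
  | cons v vs ih =>
    cases r with
    | zero =>
      have hx := h2 0 (by simp) (Nat.zero_le _)
      simp only [List.getElem_cons_zero] at hx
      have hnv : ¬ v ≤ x := not_le.mpr hx
      simp [List.takeWhile, hnv]
    | succ s =>
      have hv : v ≤ x := h1 0 (by simp) (Nat.succ_pos s)
      have : (vs.takeWhile (fun s => decide (s ≤ x))).length = s := by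
        refine ih s (by simpa using hr) ?_ ?_
        · intro j hj hjs
          exact h1 (j+1) (by simpa using Nat.succ_lt_succ hj) (Nat.succ_lt_succ hjs)
        · intro j hj hsj
          exact h2 (j+1) (by simpa using Nat.succ_lt_succ hj) (Nat.succ_le_succ hsj)
      simp [List.takeWhile, hv, this]

theorem bisect_eq_takeWhile (cv : Int) (vs : List Int) :
    (PySem.List.bisectRight (pvRunMax vs) cv)
      = ((pvRunMax vs).takeWhile (fun s => decide (s ≤ cv))).length := by
  obtain ⟨hle, h1, h2⟩ := PySem.List.bisectRight_spec (pvRunMax vs) cv (pvRunMax_pairwise vs)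
  exact (takeWhile_length_of_cut cv (pvRunMax vs) _ hle h1 h2).symm

-- ===== VERDICT (by name: the statement is the Claim_ definition above) =====
theorem calculate_max_capacity_spec : Claim_equal_calculate_max_capacity := by
  intro cv bd _
  unfold Spec_calculate_max_capacity calculate_max_capacity calculate_max_capacity_alt
  simp only [bisect_eq_takeWhile, takeWhile_runMax]
  by_cases hbd : bd = []
  · simp [hbd, pvAccum]
  · simp only [hbd, if_false]
    rw [pvLoopA_eq_takeWhile]
    have hle : (((pvAccum 0 (bd.map (fun d => d.1 * d.2.1 * d.2.2))).takeWhile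
        (fun s => decide (s ≤ cv))).length) ≤ bd.length := by
      calc _ ≤ (pvAccum 0 (bd.map (fun d => d.1 * d.2.1 * d.2.2))).length :=
              ((pvAccum 0 (bd.map (fun d => d.1 * d.2.1 * d.2.2))).takeWhile_sublist _).length_le
        _ = bd.length := by rw [pvAccum_length]; simp
    simp only [zero_add]
    omega
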